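-- pv_equiv track=rewrite | github.com/freedom-zjw/JPEG_python | JPEG/tools/Encode.py | VLI
-- ===== SOURCE A (Python) =====
-- def Dec2Bin(num): # 十进制转化二进制
--     i = 0
--     bin_num = 0
--     num = abs(num)
--     while num != 0:
--         temp = num % 2
--         num = num // 2
--         bin_num = bin_num + temp*(10**i)
--         i += 1
--     return bin_num
--
-- def VLI(num):
--     Bin_num = str(Dec2Bin(num))
--     VLI_num = ''
--     if num < 0:
--         for i in range(len(Bin_num)):
--             if Bin_num[i] == '0':
--                 VLI_num = VLI_num + '1'
--             elif Bin_num[i] == '1':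
--                 VLI_num = VLI_num + '0'
--     else:
--         VLI_num = Bin_num
--     VLI_num_len = len(VLI_num)
--     if num == 0:
--         VLI_num_len = 0
--         VLI_num = ''
--     return (VLI_num_len, VLI_num)
-- ===== SOURCE B (Python) =====
-- def VLI(num):
--     if num == 0:
--         return (0, '')
--     if num > 0:
--         s = format(num, 'b')
--     else:
--         m = -num
--         k = m.bit_length()
--         s = format((1 << k) - 1 - m, 'b').zfill(k)
--     return (len(s), s)
-- ===== Notes on version B (the rewrite author's own statement) =====
-- stated objective: simpler
-- what changed: A encodes the binary digits as a decimal number via a division loop, stringifies it and flips characters one by one for negatives; B gets the bitstring directly with format(num,'b') and, for negatives, computes the ones'-complement arithmetically by subtracting abs(num) from the all-ones mask of k=bit_length() bits and zero-padding to k digits.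
import Mathlib
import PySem

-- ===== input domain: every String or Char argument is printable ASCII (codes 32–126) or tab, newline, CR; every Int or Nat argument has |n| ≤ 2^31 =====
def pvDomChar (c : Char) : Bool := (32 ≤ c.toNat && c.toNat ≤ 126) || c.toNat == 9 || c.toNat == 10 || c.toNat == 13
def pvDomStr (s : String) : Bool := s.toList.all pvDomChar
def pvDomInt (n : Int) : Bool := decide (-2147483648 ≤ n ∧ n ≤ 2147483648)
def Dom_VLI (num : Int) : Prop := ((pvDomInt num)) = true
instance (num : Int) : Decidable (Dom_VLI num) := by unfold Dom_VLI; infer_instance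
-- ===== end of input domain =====

-- B replaces A's decimal-encoded binary number plus per-character flip loop by format(num,'b')
-- and, for negatives, a closed-form ones'-complement (2^k-1-m) zero-padded to k bits (objective: simpler).

-- ===== PORT A =====
-- the while-loop of Dec2Bin; after `num = abs(num)` the value is nonnegative, so Python's
-- `% 2` and `// 2` coincide with Nat's `% 2` and `/ 2` (exact on this domain)
def dec2binGo (num i : Nat) (bin_num : Int) : Int :=
  if h : num = 0 then bin_num
  else dec2binGo (num / 2) (i + 1) (bin_num + (num % 2 : Nat) * 10 ^ i)
termination_by num
decreasing_by exact Nat.div_lt_self (Nat.pos_of_ne_zero h) (by omega)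

def Dec2Bin (num : Int) : Int := dec2binGo num.natAbs 0 0

def VLI (num : Int) : Int × String :=
  let Bin_num : List Char := PySem.Int.toChars (Dec2Bin num)   -- str(Dec2Bin(num))
  let VLI_num : List Char :=
    if num < 0 then
      Bin_num.foldl (fun acc c =>
        if c = '0' then acc ++ ['1']
        else if c = '1' then acc ++ ['0'] else acc) []
    else Bin_num
  let VLI_num_len : Int := VLI_num.length
  if num = 0 then (0, "") else (VLI_num_len, String.ofList VLI_num)

-- ===== PORT B =====
def VLI_alt (num : Int) : Int × String :=
  if num = 0 then (0, "")
  else if num > 0 then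
    let s := PySem.Int.toBinChars num                            -- format(num, 'b')
    ((s.length : Int), String.ofList s)
  else
    let m := -num
    let k := PySem.Int.bitLength m                               -- m.bit_length()
    let s := PySem.Chars.zfill
      (PySem.Int.toBinChars (((1 : Int) <<< k) - 1 - m)) (k : Int)       -- format(...,'b').zfill(k)
    ((s.length : Int), String.ofList s)

-- ===== PRECONDITION & SPEC =====
def Spec_VLI (num : Int) (out : Int × String) : Prop := out = VLI_alt num
instance (num : Int) (out : Int × String) : Decidable (Spec_VLI num out) := by unfold Spec_VLI; infer_instance

-- ===== CLAIM (what is proved, stated in full; the proofs are below) =====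
def Claim_equal_VLI : Prop := ∀ (num : Int), Dom_VLI num → Spec_VLI num (VLI num)

-- ===== LEMMAS AND PROOFS =====

/-- value of A's while loop: the binary digits of `n` written as a decimal numeral -/
def binDec (n : Nat) : Nat :=
  if h : n = 0 then 0 else n % 2 + 10 * binDec (n / 2)
termination_by n
decreasing_by exact Nat.div_lt_self (Nat.pos_of_ne_zero h) (by omega)

/-- MSB-first digit list in base `b + 2` (empty for 0) -/
def bd (b : Nat) (n : Nat) : List Char :=
  if h : n = 0 then [] else bd b (n / (b + 2)) ++ [Nat.digitChar (n % (b + 2))]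
termination_by n
decreasing_by exact Nat.div_lt_self (Nat.pos_of_ne_zero h) (by omega)

/-- bit length -/
def bl (n : Nat) : Nat :=
  if h : n = 0 then 0 else bl (n / 2) + 1
termination_by n
decreasing_by exact Nat.div_lt_self (Nat.pos_of_ne_zero h) (by omega)

/-- fixed-width (k bits) MSB-first binary digits -/
def F : Nat → Nat → List Char
  | 0, _ => []
  | k + 1, v => F k (v / 2) ++ [Nat.digitChar (v % 2)]

def flipc (c : Char) : Char := if c = '0' then '1' else '0'

lemma toDigitsCore_append (b : Nat) :
    ∀ (f n : Nat) (l : List Char),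
      Nat.toDigitsCore b f n l = Nat.toDigitsCore b f n [] ++ l := by
  intro f
  induction f with
  | zero => intro n l; simp [Nat.toDigitsCore]
  | succ f ih =>
    intro n l
    simp only [Nat.toDigitsCore]
    by_cases h : n / b = 0
    · simp [h]
    · simp only [h, if_false]
      rw [ih (n / b) [_], ih (n / b) (_ :: l)]
      simp

lemma toDigitsCore_fuel (b : Nat) (hb : 2 ≤ b) :
    ∀ (n f1 f2 : Nat), n < f1 → n < f2 →
      Nat.toDigitsCore b f1 n [] = Nat.toDigitsCore b f2 n [] := by
  intro n
  induction n using Nat.strong_induction_on with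
  | _ n ih =>
    intro f1 f2 h1 h2
    obtain ⟨g1, rfl⟩ : ∃ g, f1 = g + 1 := ⟨f1 - 1, by omega⟩
    obtain ⟨g2, rfl⟩ : ∃ g, f2 = g + 1 := ⟨f2 - 1, by omega⟩
    simp only [Nat.toDigitsCore]
    by_cases h : n / b = 0
    · simp [h]
    · simp only [h, if_false]
      have hn0 : 0 < n := by
        rcases Nat.eq_zero_or_pos n with rfl | h'
        · exact absurd (Nat.zero_div b) h
        · exact h'
      have hlt : n / b < n := Nat.div_lt_self hn0 (by omega)
      rw [toDigitsCore_append b g1, toDigitsCore_append b g2,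
        ih (n / b) hlt g1 g2 (lt_of_lt_of_le hlt (by omega)) (lt_of_lt_of_le hlt (by omega))]

lemma toDigits_eq_bd (b : Nat) : ∀ n : Nat, 0 < n → Nat.toDigits (b + 2) n = bd b n := by
  intro n
  induction n using Nat.strong_induction_on with
  | _ n ih =>
    intro hn
    have hne : ¬ n = 0 := by omega
    have hlt : n / (b + 2) < n := Nat.div_lt_self hn (by omega)
    rw [bd, dif_neg hne]
    simp only [Nat.toDigits, Nat.toDigitsCore]
    by_cases h : n / (b + 2) = 0
    · simp [h, bd]
    · simp only [h, if_false]
      rw [toDigitsCore_append, toDigitsCore_fuel (b + 2) (by omega) (n / (b + 2)) n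
        (n / (b + 2) + 1) hlt (Nat.lt_succ_self _)]
      rw [← Nat.toDigits, ih (n / (b + 2)) hlt (Nat.pos_of_ne_zero h)]

lemma dec2binGo_spec : ∀ (n i : Nat) (bin : Int),
    dec2binGo n i bin = bin + (binDec n : Int) * 10 ^ i := by
  intro n
  induction n using Nat.strong_induction_on with
  | _ n ih =>
    intro i bin
    rw [dec2binGo, binDec]
    by_cases h : n = 0
    · simp [h]
    · have hlt : n / 2 < n := Nat.div_lt_self (Nat.pos_of_ne_zero h) (by omega)
      simp only [h, dif_neg, not_false_iff]
      rw [ih (n / 2) hlt]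
      push_cast
      ring

lemma binDec_pos : ∀ n : Nat, 0 < n → 0 < binDec n := by
  intro n
  induction n using Nat.strong_induction_on with
  | _ n ih =>
    intro hn
    rw [binDec]
    simp only [dif_neg (by omega : ¬ n = 0)]
    rcases Nat.mod_two_eq_zero_or_one n with h | h
    · have h2 : 0 < n / 2 := by omega
      have := ih (n / 2) (Nat.div_lt_self hn (by omega)) h2
      omega
    · omega

lemma bd_binDec : ∀ n : Nat, bd 8 (binDec n) = bd 0 n := by
  intro n
  induction n using Nat.strong_induction_on with
  | _ n ih =>
    by_cases h : n = 0
    · simp [h, binDec, bd]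
    · have hE : binDec n = n % 2 + 10 * binDec (n / 2) := by rw [binDec]; simp [h]
      have hpos : binDec n ≠ 0 := by
        have := binDec_pos n (Nat.pos_of_ne_zero h); omega
      have hd : binDec n / 10 = binDec (n / 2) := by omega
      have hm : binDec n % 10 = n % 2 := by omega
      rw [bd, dif_neg hpos]
      conv_rhs => rw [bd, dif_neg h]
      rw [hd, hm, ih (n / 2) (Nat.div_lt_self (Nat.pos_of_ne_zero h) (by omega))]

lemma bd0_mem : ∀ n : Nat, ∀ c ∈ bd 0 n, c = '0' ∨ c = '1' := by
  intro n
  induction n using Nat.strong_induction_on with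
  | _ n ih =>
    intro c hc
    by_cases h : n = 0
    · simp [h, bd] at hc
    · rw [bd, dif_neg h] at hc
      rcases List.mem_append.mp hc with h1 | h1
      · exact ih (n / 2) (Nat.div_lt_self (Nat.pos_of_ne_zero h) (by omega)) c h1
      · simp only [List.mem_singleton] at h1
        rcases Nat.mod_two_eq_zero_or_one n with h2 | h2 <;> subst h1 <;> rw [h2]
        · left; rfl
        · right; rfl

lemma fold_flip : ∀ (l : List Char) (acc : List Char),
    (∀ c ∈ l, c = '0' ∨ c = '1') →
    l.foldl (fun acc c =>
        if c = '0' then acc ++ ['1']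
        else if c = '1' then acc ++ ['0'] else acc) acc = acc ++ l.map flipc := by
  intro l
  induction l with
  | nil => simp
  | cons c t ih =>
    intro acc h
    have hc := h c (by simp)
    simp only [List.foldl_cons, List.map_cons]
    rcases hc with rfl | rfl
    · rw [if_pos rfl, ih _ (fun x hx => h x (by simp [hx]))]
      simp [flipc]
    · rw [if_neg (by decide), if_pos rfl, ih _ (fun x hx => h x (by simp [hx]))]
      simp [flipc]

lemma bitLength_eq_bl : ∀ m : Nat, PySem.Int.bitLength (m : Int) = bl m := by
  intro m
  induction m using Nat.strong_induction_on with
  | _ m ih =>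
    by_cases h : m = 0
    · simp [h, PySem.Int.bitLength_zero, bl]
    · have hbl : bl m = bl (m / 2) + 1 := by rw [bl]; simp [h]
      rw [PySem.Int.bitLength_natCast (Nat.pos_of_ne_zero h),
        ih (m / 2) (Nat.div_lt_self (Nat.pos_of_ne_zero h) (by omega)), hbl]

lemma lt_two_pow_bl : ∀ n : Nat, n < 2 ^ bl n := by
  intro n
  induction n using Nat.strong_induction_on with
  | _ n ih =>
    by_cases h : n = 0
    · simp [h, bl]
    · rw [bl, dif_neg h, pow_succ]
      have := ih (n / 2) (Nat.div_lt_self (Nat.pos_of_ne_zero h) (by omega))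
      omega

lemma bl_le_of_lt : ∀ (k v : Nat), v < 2 ^ k → bl v ≤ k := by
  intro k
  induction k with
  | zero => intro v hv; interval_cases v; simp [bl]
  | succ k ih =>
    intro v hv
    by_cases h : v = 0
    · simp [h, bl]
    · rw [bl, dif_neg h]
      have : v / 2 < 2 ^ k := by rw [pow_succ] at hv; omega
      exact Nat.succ_le_succ (ih _ this)

lemma bd_eq_F : ∀ n : Nat, bd 0 n = F (bl n) n := by
  intro n
  induction n using Nat.strong_induction_on with
  | _ n ih =>
    by_cases h : n = 0
    · simp [h, bd, bl, F]
    · rw [bd, dif_neg h, bl, dif_neg h, F,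
        ih (n / 2) (Nat.div_lt_self (Nat.pos_of_ne_zero h) (by omega))]

lemma F_length : ∀ (k v : Nat), (F k v).length = k := by
  intro k
  induction k with
  | zero => intro v; rfl
  | succ k ih => intro v; simp [F, ih]

lemma F_zero : ∀ k : Nat, F k 0 = List.replicate k '0' := by
  intro k
  induction k with
  | zero => rfl
  | succ k ih => rw [F, ih, List.replicate_succ']; rfl

lemma F_succ_zero : ∀ (k v : Nat), v < 2 ^ k → F (k + 1) v = '0' :: F k v := by
  intro k
  induction k with
  | zero =>
    intro v hv
    interval_cases v
    rfl
  | succ k ih =>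
    intro v hv
    have h2 : v / 2 < 2 ^ k := by rw [pow_succ] at hv; omega
    show F (k + 1 + 1) v = '0' :: F (k + 1) v
    conv_lhs => rw [F]
    rw [ih (v / 2) h2]
    conv_rhs => rw [F]
    rfl

lemma F_pad : ∀ (d k v : Nat), v < 2 ^ k →
    F (k + d) v = List.replicate d '0' ++ F k v := by
  intro d
  induction d with
  | zero => intro k v _; simp
  | succ d ih =>
    intro k v hv
    have hlt : v < 2 ^ (k + d) :=
      lt_of_lt_of_le hv (Nat.pow_le_pow_right (by omega) (by omega))
    have : k + (d + 1) = (k + d) + 1 := by omega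
    rw [this, F_succ_zero (k + d) v hlt, ih k v hv, List.replicate_succ]
    rfl

lemma flip_F : ∀ (k v : Nat), v < 2 ^ k →
    (F k v).map flipc = F k (2 ^ k - 1 - v) := by
  intro k
  induction k with
  | zero => intro v hv; rfl
  | succ k ih =>
    intro v hv
    have hp : (2:Nat) ^ (k + 1) = 2 ^ k * 2 := pow_succ 2 k
    have h2 : v / 2 < 2 ^ k := by omega
    have hd : (2 ^ (k + 1) - 1 - v) / 2 = 2 ^ k - 1 - v / 2 := by omega
    have hm : (2 ^ (k + 1) - 1 - v) % 2 = 1 - v % 2 := by omega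
    rw [F, F, hd, hm, List.map_append, ih (v / 2) h2]
    congr 1
    rcases Nat.mod_two_eq_zero_or_one v with h | h <;> rw [h] <;> rfl

lemma zfill_toDigits2 : ∀ (k v : Nat), 0 < k → v < 2 ^ k →
    PySem.Chars.zfill (Nat.toDigits 2 v) (k : Int) = F k v := by
  intro k v hk hv
  by_cases h0 : v = 0
  · subst h0
    have h01 : Nat.toDigits 2 0 = ['0'] := rfl
    rw [h01, F_zero, PySem.Chars.zfill.eq_def]
    by_cases h1 : k = 1
    · simp [h1]
    · have hgt : ¬ ((k : Int) ≤ ((['0'] : List Char).length : Int)) := by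
        simp only [List.length_singleton]; omega
      rw [if_neg hgt]
      simp only [if_neg (by decide : ¬ ('0' = '+' ∨ '0' = '-'))]
      have hk1 : (k : Int).toNat - (['0'] : List Char).length = k - 1 := by
        simp only [List.length_singleton]; omega
      rw [hk1]
      have : k = (k - 1) + 1 := by omega
      rw [this, List.replicate_succ']
      simp
  · have hpos : 0 < v := Nat.pos_of_ne_zero h0
    have hbd : Nat.toDigits 2 v = bd 0 v := toDigits_eq_bd 0 v hpos
    have hF : bd 0 v = F (bl v) v := bd_eq_F v
    have hlen : (bd 0 v).length = bl v := by rw [hF, F_length]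
    have hble : bl v ≤ k := bl_le_of_lt k v hv
    rw [hbd, PySem.Chars.zfill.eq_def]
    by_cases hle : (k : Int) ≤ ((bd 0 v).length : Int)
    · have : bl v = k := by omega
      rw [if_pos hle, hF, this]
    · rw [if_neg hle]
      have hblpos : 0 < bl v := by
        rw [bl, dif_neg h0]; omega
      obtain ⟨c, rest, hcr⟩ : ∃ c rest, bd 0 v = c :: rest := by
        rcases h : bd 0 v with _ | ⟨c, rest⟩
        · rw [h] at hlen; simp at hlen; omega
        · exact ⟨c, rest, rfl⟩
      have hc01 : c = '0' ∨ c = '1' := bd0_mem v c (by rw [hcr]; simp)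
      rw [hcr]
      have hnotsign : ¬ (c = '+' ∨ c = '-') := by
        rcases hc01 with rfl | rfl <;> decide
      simp only [if_neg hnotsign]
      rw [← hcr]
      have harith : (k : Int).toNat - (bd 0 v).length = k - bl v := by omega
      rw [harith, hF]
      have : k = bl v + (k - bl v) := by omega
      rw [this, F_pad (k - bl v) (bl v) v (lt_two_pow_bl v)]
      simp

lemma toDigits2_eq (n : Nat) (h : 0 < n) : Nat.toDigits 2 n = bd 0 n :=
  toDigits_eq_bd 0 n h

lemma toDigits10_eq (n : Nat) (h : 0 < n) : Nat.toDigits 10 n = bd 8 n :=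
  toDigits_eq_bd 8 n h

lemma toChars_binDec (m : Nat) (hm : 0 < m) :
    PySem.Int.toChars ((binDec m : Nat) : Int) = bd 0 m := by
  rw [PySem.Int.toChars, if_neg (by simp), Int.toNat_natCast,
    toDigits10_eq _ (binDec_pos m hm), bd_binDec]

lemma shift_one (k : Nat) : (1 : Int) <<< k = 2 ^ k := by
  simp [Int.shiftLeft_eq]

lemma toBinChars_natCast (v : Nat) :
    PySem.Int.toBinChars ((v : Nat) : Int) = Nat.toDigits 2 v := by
  rw [PySem.Int.toBinChars, if_neg (by simp), Int.toNat_natCast]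

-- ===== VERDICT (by name: the statement is the Claim_ definition above) =====
theorem VLI_spec : Claim_equal_VLI := by
  unfold Claim_equal_VLI Spec_VLI
  intro num _
  by_cases h0 : num = 0
  · subst h0; simp [VLI, VLI_alt]
  · have hmpos : 0 < num.natAbs := by omega
    have hdec : Dec2Bin num = ((binDec num.natAbs : Nat) : Int) := by
      rw [Dec2Bin, dec2binGo_spec]; simp
    have hchars : PySem.Int.toChars (Dec2Bin num) = bd 0 num.natAbs := by
      rw [hdec, toChars_binDec _ hmpos]
    by_cases hneg : num < 0
    · set m := num.natAbs with hm
      have hmeq : -num = (m : Int) := by omega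
      have hlt2 : m < 2 ^ bl m := lt_two_pow_bl m
      have hblpos : 0 < bl m := by rw [bl, dif_neg (by omega : ¬ m = 0)]; omega
      have hveq : ((1 : Int) <<< PySem.Int.bitLength (-num)) - 1 - (-num)
          = ((2 ^ bl m - 1 - m : Nat) : Int) := by
        have h2c : ((2 : Int)) ^ bl m = ((2 ^ bl m : Nat) : Int) := by push_cast; ring
        rw [hmeq, bitLength_eq_bl, shift_one, h2c]
        omega
      have hA : (bd 0 m).map flipc = F (bl m) (2 ^ bl m - 1 - m) := by
        rw [bd_eq_F, flip_F (bl m) m hlt2]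
      have hB : PySem.Chars.zfill
          (PySem.Int.toBinChars (((1 : Int) <<< PySem.Int.bitLength (-num)) - 1 - (-num)))
          ((PySem.Int.bitLength (-num) : Nat) : Int)
          = F (bl m) (2 ^ bl m - 1 - m) := by
        rw [hveq, hmeq, bitLength_eq_bl, toBinChars_natCast,
          zfill_toDigits2 (bl m) _ hblpos (by omega)]
      simp only [VLI, VLI_alt, if_neg h0, if_pos hneg, if_neg (by omega : ¬ num > 0)]
      rw [hchars, fold_flip (bd 0 m) [] (bd0_mem m), List.nil_append, hA, hB]
    · have hgt : num > 0 := by omega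
      have hBpos : PySem.Int.toBinChars num = bd 0 num.natAbs := by
        rw [PySem.Int.toBinChars, if_neg hneg]
        have : num.toNat = num.natAbs := by omega
        rw [this, toDigits2_eq _ hmpos]
      simp only [VLI, VLI_alt, if_neg h0, if_neg hneg, if_pos hgt, hchars, hBpos]
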